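-- pv_equiv track=rewrite | github.com/felse/xtreemfs_colocation_client | tests/test_dataDistribution.py | create_osd_information
-- ===== SOURCE A (Python) =====
-- osd_id_prefix = 'osd_'
--
-- def create_osd_information(num_osds, osd_capacities):
--     osd_information = {}
--     i = 0
--     for osd_capacity in osd_capacities:
--         for j in range(0, num_osds):
--             osd_information[create_osd_id(i)] = osd_capacity
--             i += 1
--     return osd_information
--
-- def create_osd_id(index):
--     return osd_id_prefix + "_" + str(index)
-- ===== SOURCE B (Python) =====
-- osd_id_prefix = 'osd_'
--
-- def create_osd_information(num_osds, osd_capacities):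
--     total = num_osds * len(osd_capacities)
--     osd_information = {}
--     for index in range(total):
--         osd_information[create_osd_id(index)] = osd_capacities[index // num_osds]
--     return osd_information
--
-- def create_osd_id(index):
--     return osd_id_prefix + "_" + str(index)
-- ===== Notes on version B (the rewrite author's own statement) =====
-- stated objective: simpler
-- what changed: Replaces the nested capacity/range loops with a manually incremented counter by a single flat loop over range(num_osds*len(osd_capacities)) that picks the capacity block via integer division.
import Mathlib
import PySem

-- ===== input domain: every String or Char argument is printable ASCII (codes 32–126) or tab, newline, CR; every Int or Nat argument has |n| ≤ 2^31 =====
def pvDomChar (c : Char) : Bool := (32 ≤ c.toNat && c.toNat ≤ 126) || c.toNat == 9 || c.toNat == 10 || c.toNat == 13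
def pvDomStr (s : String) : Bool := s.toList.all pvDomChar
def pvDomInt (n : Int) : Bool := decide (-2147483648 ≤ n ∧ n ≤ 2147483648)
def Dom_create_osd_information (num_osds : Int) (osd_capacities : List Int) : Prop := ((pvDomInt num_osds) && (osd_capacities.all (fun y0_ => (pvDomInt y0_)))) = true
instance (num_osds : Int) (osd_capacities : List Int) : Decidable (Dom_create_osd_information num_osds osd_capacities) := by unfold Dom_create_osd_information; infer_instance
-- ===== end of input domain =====

-- B replaces A's nested loops with a manual counter by one flat loop using integer
-- division to pick the capacity block (objective: simpler decomposition).

-- ===== PORT A =====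
def create_osd_id (index : Int) : String := "osd_" ++ "_" ++ PySem.Int.toStr index

def create_osd_information (num_osds : Int) (osd_capacities : List Int) : List (String × Int) :=
  (osd_capacities.foldl
    (fun (st : PySem.Dict String Int × Int) osd_capacity =>
      (PySem.List.pyRange 0 num_osds 1).foldl
        (fun st2 _j => (st2.1.insert (create_osd_id st2.2) osd_capacity, st2.2 + 1)) st)
    (PySem.Dict.empty, 0)).1.items

-- ===== PORT B =====
-- the index 'index // num_osds' is always in range when the loop runs, so pyGetD with
-- default 0 is exact (Python's indexing never raises here)
def create_osd_information_alt (num_osds : Int) (osd_capacities : List Int) : List (String × Int) :=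
  (((PySem.List.pyRange 0 (num_osds * (osd_capacities.length : Int)) 1).foldl
    (fun (d : PySem.Dict String Int) index =>
      d.insert (create_osd_id index)
        (PySem.List.pyGetD osd_capacities (PySem.Int.floordiv index num_osds) 0))
    PySem.Dict.empty)).items

-- ===== PRECONDITION & SPEC =====
def Spec_create_osd_information (num_osds : Int) (osd_capacities : List Int) (out : List (String × Int)) : Prop := out = create_osd_information_alt num_osds osd_capacities
instance (num_osds : Int) (osd_capacities : List Int) (out : List (String × Int)) : Decidable (Spec_create_osd_information num_osds osd_capacities out) := by unfold Spec_create_osd_information; infer_instance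

-- ===== CLAIM (what is proved, stated in full; the proofs are below) =====
def Claim_equal_create_osd_information : Prop := ∀ (num_osds : Int) (osd_capacities : List Int), Dom_create_osd_information num_osds osd_capacities → Spec_create_osd_information num_osds osd_capacities (create_osd_information num_osds osd_capacities)

-- ===== LEMMAS AND PROOFS =====

-- A's inner counter loop over range(0,n) (length t) equals a fold over the index
-- range [i, i+t) inserting g j, whenever g is constantly c on that range.
lemma counter_fold (c : Int) (g : Int → Int) :
    ∀ (t : Nat) (a i : Int) (d : PySem.Dict String Int),
      (∀ j, i ≤ j → j < i + t → g j = c) →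
      (PySem.List.pyRange a (a + t) 1).foldl
          (fun st2 _ => (st2.1.insert (create_osd_id st2.2) c, st2.2 + 1)) (d, i)
        = ((PySem.List.pyRange i (i + t) 1).foldl
            (fun d j => d.insert (create_osd_id j) (g j)) d, i + t) := by
  intro t
  induction t with
  | zero =>
    intro a i d hg
    simp
  | succ t ih =>
    intro a i d hg
    rw [PySem.List.pyRange_one_cons (by push_cast; omega : a < a + ((t + 1 : Nat) : Int)),
        PySem.List.pyRange_one_cons (by push_cast; omega : i < i + ((t + 1 : Nat) : Int))]
    simp only [List.foldl_cons]
    have hgi : g i = c := hg i le_rfl (by push_cast; omega)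
    have h1 : a + ((t + 1 : Nat) : Int) = (a + 1) + (t : Nat) := by push_cast; ring
    have h2 : i + ((t + 1 : Nat) : Int) = (i + 1) + (t : Nat) := by push_cast; ring
    rw [h1, h2, hgi]
    exact ih (a + 1) (i + 1) (d.insert (create_osd_id i) c)
      (fun j hj1 hj2 => hg j (by omega) (by push_cast at hj2 ⊢; omega))

-- main correspondence for n > 0: processing the suffix full.drop k of the capacity
-- list starting at counter n*k equals B's flat fold over [n*k, n*(k+len caps)).
lemma main_fold (n : Int) (hn : 0 < n) (full : List Int) :
    ∀ (caps : List Int) (k : Nat) (d : PySem.Dict String Int),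
      full.drop k = caps →
      caps.foldl
          (fun (st : PySem.Dict String Int × Int) c =>
            (PySem.List.pyRange 0 n 1).foldl
              (fun st2 _ => (st2.1.insert (create_osd_id st2.2) c, st2.2 + 1)) st)
          (d, n * k)
        = ((PySem.List.pyRange (n * k) (n * (k + caps.length)) 1).foldl
            (fun d j => d.insert (create_osd_id j)
              (PySem.List.pyGetD full (PySem.Int.floordiv j n) 0)) d,
           n * (k + caps.length)) := by
  intro caps
  induction caps with
  | nil =>
    intro k d _
    simp
  | cons c caps ih =>
    intro k d hdrop
    simp only [List.foldl_cons]
    have hk : (k : ℕ) < full.length := by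
      by_contra h
      rw [List.drop_eq_nil_of_le (by omega)] at hdrop
      simp at hdrop
    have hck : full[k]? = some c := by
      have h0 : (full.drop k)[0]? = some c := by rw [hdrop]; rfl
      rw [List.getElem?_drop] at h0
      simpa using h0
    have hg : ∀ j, n * k ≤ j → j < n * k + (n.toNat : Int) →
        PySem.List.pyGetD full (PySem.Int.floordiv j n) 0 = c := by
      intro j hj1 hj2
      have hdiv : PySem.Int.floordiv j n = (k : Int) := by
        rw [PySem.Int.floordiv_eq_iff_of_pos hn]
        constructor
        · linarith [mul_comm n (k : Int)]
        · have : ((k : Int) + 1) * n = n * k + n := by ring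
          omega
      rw [hdiv, show ((k : Int)) = ((k : Nat) : Int) from rfl, PySem.List.pyGetD_natCast]
      simp [List.getD_eq_getElem?_getD, hck]
    have hrange : PySem.List.pyRange 0 n 1 = PySem.List.pyRange 0 (0 + (n.toNat : Int)) 1 := by
      congr 1; omega
    have step := counter_fold c (fun j => PySem.List.pyGetD full (PySem.Int.floordiv j n) 0)
      n.toNat 0 (n * k) d hg
    simp only [] at step
    rw [← hrange] at step
    rw [step]
    have hnk1 : n * k + (n.toNat : Int) = n * ((k : Int) + 1) := by
      have : (n.toNat : Int) = n := by omega
      rw [this]; ring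
    have hk1 : full.drop (k + 1) = caps := by
      have := congrArg List.tail hdrop
      simpa [List.tail_drop] using this
    have ihk := ih (k + 1)
      ((PySem.List.pyRange (n * k) (n * k + (n.toNat : Int)) 1).foldl
        (fun d j => d.insert (create_osd_id j)
          (PySem.List.pyGetD full (PySem.Int.floordiv j n) 0)) d) hk1
    rw [show (((k + 1 : Nat)) : Int) = (k : Int) + 1 from by push_cast; ring] at ihk
    rw [← hnk1] at ihk
    rw [ihk, hnk1, ← List.foldl_append,
        ← PySem.List.pyRange_one_append (n * k) (n * ((k : Int) + 1))
            (n * (((k : Int) + 1) + (caps.length : Int)))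
            (by nlinarith)
            (by nlinarith [Int.natCast_nonneg caps.length])]
    have hlen : ((k : Int) + 1) + (caps.length : Int) = (k : Int) + ((c :: caps).length : Int) := by
      push_cast [List.length_cons]; ring
    rw [hlen]

-- ===== VERDICT (by name: the statement is the Claim_ definition above) =====
theorem create_osd_information_spec : Claim_equal_create_osd_information := by
  intro n caps _
  unfold Spec_create_osd_information create_osd_information create_osd_information_alt
  by_cases hn : 0 < n
  · have h := main_fold n hn caps caps 0 PySem.Dict.empty (by simp)
    rw [show n * (((0 : Nat)) : Int) = 0 from by simp,
        show (((0 : Nat)) : Int) + (caps.length : Int) = (caps.length : Int) from by simp] at h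
    rw [h]
  · rw [PySem.List.pyRange_one_eq_nil (by omega : n ≤ (0 : Int)),
        PySem.List.pyRange_one_eq_nil
          (by nlinarith [Int.natCast_nonneg caps.length] : n * (caps.length : Int) ≤ 0)]
    simp
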